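-- pv_equiv track=rewrite | github.com/rakx07/MIT261-FINAL_PROJECT | scripts/promote_orphan_students.py | _make_terms_path
-- ===== SOURCE A (Python) =====
-- SCHOOL_YEARS = ["2020-2021", "2021-2022", "2022-2023", "2023-2024"]
--
-- def _make_terms_path(start_sy: str, start_year_level: int, n_terms: int, include_summer=True):
--     """
--     Produce a list of (school_year, semester, year_level_for_that_term) of length n_terms,
--     starting from given school_year and academic yearLevel.
--     We advance year_level on S2->next-year S1; Summer keeps same year_level.
--     """
--     out = []
--     sy_list = list(SCHOOL_YEARS)
--     if start_sy not in sy_list: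
--         sy_list = SCHOOL_YEARS
--         start_sy = SCHOOL_YEARS[0]
--
--     sy_idx = sy_list.index(start_sy)
--     yl = max(1, min(4, int(start_year_level)))
--
--     # term sequence starting at S1 typically; but allow starting S1 or S2 randomly
--     sem_seq = [1, 2] + ([3] if include_summer else [])
--     sem_pos = 0  # always start at S1 for consistency
--
--     while len(out) < n_terms and sy_idx < len(sy_list):
--         sem = sem_seq[sem_pos]
--         out.append((sy_list[sy_idx], sem, yl))
--         sem_pos += 1
--         if sem_pos >= len(sem_seq):
--             sem_pos = 0
--             # after S2 we increase year level; summer does not auto-advance level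
--             yl = min(4, yl + 1)
--             sy_idx += 1
--
--     return out
-- ===== SOURCE B (Python) =====
-- SCHOOL_YEARS = ["2020-2021", "2021-2022", "2022-2023", "2023-2024"]
--
-- def _make_terms_path(start_sy: str, start_year_level: int, n_terms: int, include_summer=True):
--     sy_list = list(SCHOOL_YEARS)
--     start = sy_list.index(start_sy) if start_sy in sy_list else 0
--     yl = max(1, min(4, int(start_year_level)))
--     sem_seq = [1, 2, 3] if include_summer else [1, 2]
--     L = len(sem_seq)
--     limit = min(n_terms, (len(sy_list) - start) * L)
--     return [(sy_list[start + i // L], sem_seq[i % L], min(4, yl + i // L))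
--             for i in range(limit)]
-- ===== Notes on version B (the rewrite author's own statement) =====
-- stated objective: alternative
-- what changed: Replaces A's while-loop threading mutable state (out, sem_pos, sy_idx, yl) with a closed-form comprehension deriving each term from its index i via divmod (cycle = i//L, sem = sem_seq[i%L]), with the length precomputed as min(n_terms, remaining_years*L).
import Mathlib
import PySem

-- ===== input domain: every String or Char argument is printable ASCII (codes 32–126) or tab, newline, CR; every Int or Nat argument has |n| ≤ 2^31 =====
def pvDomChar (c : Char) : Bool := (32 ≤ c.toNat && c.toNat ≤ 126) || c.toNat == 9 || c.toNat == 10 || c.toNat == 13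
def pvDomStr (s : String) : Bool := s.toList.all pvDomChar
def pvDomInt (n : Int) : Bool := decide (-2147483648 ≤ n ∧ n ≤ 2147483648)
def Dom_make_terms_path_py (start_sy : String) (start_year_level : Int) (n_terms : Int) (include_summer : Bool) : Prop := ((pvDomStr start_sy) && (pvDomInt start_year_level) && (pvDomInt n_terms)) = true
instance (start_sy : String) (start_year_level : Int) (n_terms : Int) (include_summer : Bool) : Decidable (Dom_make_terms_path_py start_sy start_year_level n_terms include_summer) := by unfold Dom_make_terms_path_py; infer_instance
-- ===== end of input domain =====

-- B replaces A's mutable-state while loop by a closed-form comprehension deriving each term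
-- from its index (objective: alternative decomposition, same cost).

-- ===== PORT A =====
def pvSchoolYears : List String := ["2020-2021", "2021-2022", "2022-2023", "2023-2024"]

-- the while loop of A, with its exact state (out, sem_pos, sy_idx, yl); fuel is an upper
-- bound on the number of iterations (the loop appends one element per step and also stops
-- once sy_idx reaches len(sy_list)), so it never truncates the loop
def pvLoopA (sy_list : List String) (sem_seq : List Int) (n_terms : Int) :
    Nat → List (String × Int × Int) → Int → Int → Int → List (String × Int × Int)
  | 0, out, _, _, _ => out
  | fuel+1, out, sem_pos, sy_idx, yl =>
    if (out.length : Int) < n_terms ∧ sy_idx < (sy_list.length : Int) then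
      let sem := (PySem.List.pyGet? sem_seq sem_pos).getD 0
      let out' := out ++ [((PySem.List.pyGet? sy_list sy_idx).getD "", sem, yl)]
      let sem_pos' := sem_pos + 1
      if sem_pos' ≥ (sem_seq.length : Int) then
        pvLoopA sy_list sem_seq n_terms fuel out' 0 (sy_idx + 1) (min 4 (yl + 1))
      else
        pvLoopA sy_list sem_seq n_terms fuel out' sem_pos' sy_idx yl
    else out

def make_terms_path_py (start_sy : String) (start_year_level : Int) (n_terms : Int) (include_summer : Bool) : List (String × Int × Int) :=
  let sy_list := pvSchoolYears
  let start_sy' := if sy_list.contains start_sy then start_sy else "2020-2021"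
  let sy_idx : Int := ((PySem.List.index? sy_list start_sy').getD 0 : Nat)
  let yl : Int := max 1 (min 4 start_year_level)
  let sem_seq : List Int := [1, 2] ++ (if include_summer then [3] else [])
  pvLoopA sy_list sem_seq n_terms (min n_terms.toNat (sy_list.length * sem_seq.length)) [] 0 sy_idx yl

-- ===== PORT B =====
def make_terms_path_py_alt (start_sy : String) (start_year_level : Int) (n_terms : Int) (include_summer : Bool) : List (String × Int × Int) :=
  let sy_list := pvSchoolYears
  let start : Int := if sy_list.contains start_sy then ((PySem.List.index? sy_list start_sy).getD 0 : Nat) else 0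
  let yl : Int := max 1 (min 4 start_year_level)
  let sem_seq : List Int := if include_summer then [1, 2, 3] else [1, 2]
  let L : Int := sem_seq.length
  let limit : Int := min n_terms (((sy_list.length : Int) - start) * L)
  (PySem.List.pyRange 0 limit 1).map (fun i =>
    ((PySem.List.pyGet? sy_list (start + PySem.Int.floordiv i L)).getD "",
     (PySem.List.pyGet? sem_seq (PySem.Int.mod i L)).getD 0,
     min 4 (yl + PySem.Int.floordiv i L)))

-- ===== PRECONDITION & SPEC =====
def Spec_make_terms_path_py (start_sy : String) (start_year_level : Int) (n_terms : Int) (include_summer : Bool) (out : List (String × Int × Int)) : Prop := out = make_terms_path_py_alt start_sy start_year_level n_terms include_summer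
instance (start_sy : String) (start_year_level : Int) (n_terms : Int) (include_summer : Bool) (out : List (String × Int × Int)) : Decidable (Spec_make_terms_path_py start_sy start_year_level n_terms include_summer out) := by unfold Spec_make_terms_path_py; infer_instance

-- ===== CLAIM (what is proved, stated in full; the proofs are below) =====
def Claim_equal_make_terms_path_py : Prop := ∀ (start_sy : String) (start_year_level : Int) (n_terms : Int) (include_summer : Bool), Dom_make_terms_path_py start_sy start_year_level n_terms include_summer → Spec_make_terms_path_py start_sy start_year_level n_terms include_summer (make_terms_path_py start_sy start_year_level n_terms include_summer)

-- ===== LEMMAS AND PROOFS =====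

-- A's loop result does not depend on n_terms as long as n_terms bounds out.length + fuel
lemma pvLoopA_congr_n (sy_list : List String) (sem_seq : List Int) :
    ∀ (fuel : Nat) (out : List (String × Int × Int)) (sem_pos sy_idx yl n₁ n₂ : Int),
      (out.length : Int) + fuel ≤ n₁ → (out.length : Int) + fuel ≤ n₂ →
      pvLoopA sy_list sem_seq n₁ fuel out sem_pos sy_idx yl
        = pvLoopA sy_list sem_seq n₂ fuel out sem_pos sy_idx yl := by
  intro fuel
  induction fuel with
  | zero => intro out sem_pos sy_idx yl n₁ n₂ h1 h2; rfl
  | succ f ih =>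
    intro out sem_pos sy_idx yl n₁ n₂ h1 h2
    simp only [pvLoopA]
    have hl1 : (out.length : Int) < n₁ := by push_cast at h1 ⊢; omega
    have hl2 : (out.length : Int) < n₂ := by push_cast at h2 ⊢; omega
    by_cases hidx : sy_idx < (sy_list.length : Int)
    · rw [if_pos (And.intro hl1 hidx), if_pos (And.intro hl2 hidx)]
      by_cases hsp : sem_pos + 1 ≥ (sem_seq.length : Int)
      · rw [if_pos hsp, if_pos hsp]
        apply ih
        · simp only [List.length_append, List.length_singleton]; push_cast at h1 ⊢; omega
        · simp only [List.length_append, List.length_singleton]; push_cast at h2 ⊢; omega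
      · rw [if_neg hsp, if_neg hsp]
        apply ih
        · simp only [List.length_append, List.length_singleton]; push_cast at h1 ⊢; omega
        · simp only [List.length_append, List.length_singleton]; push_cast at h2 ⊢; omega
    · rw [if_neg (by tauto), if_neg (by tauto)]

set_option maxHeartbeats 1600000 in
lemma pv_main (start_sy : String) (start_year_level n_terms : Int) (include_summer : Bool) :
    make_terms_path_py start_sy start_year_level n_terms include_summer
      = make_terms_path_py_alt start_sy start_year_level n_terms include_summer := by
  have hyb : 1 ≤ max 1 (min 4 start_year_level) ∧ max 1 (min 4 start_year_level) ≤ 4 := by omega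
  by_cases hs : pvSchoolYears.contains start_sy = true
  · have hmem : start_sy ∈ pvSchoolYears := by simpa using hs
    obtain ⟨k, hk⟩ := Option.isSome_iff_exists.mp ((PySem.List.index?_isSome_iff pvSchoolYears start_sy).mpr hmem)
    have hklt : k < pvSchoolYears.length := (PySem.List.getElem_of_index?_eq_some hk).1
    simp only [pvSchoolYears, List.length_cons, List.length_nil] at hklt
    simp only [make_terms_path_py, make_terms_path_py_alt, hs, if_pos]
    rw [hk]
    simp only [Option.getD_some]
    generalize hcy : max 1 (min 4 start_year_level) = c
    rw [hcy] at hyb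
    obtain ⟨hc1, hc4⟩ := hyb
    rcases include_summer with _ | _ <;> interval_cases k <;> interval_cases c <;>
      (rcases (by omega : n_terms ≤ 0 ∨ (0 < n_terms ∧ n_terms < 13) ∨ 13 ≤ n_terms) with hn | ⟨hn, h13⟩ | h13
       · rw [PySem.List.pyRange_one_eq_nil (by simp [pvSchoolYears]; try omega)]
         simp [pvLoopA, Int.toNat_of_nonpos hn]
       · interval_cases n_terms <;> decide
       · rw [pvLoopA_congr_n _ _ _ _ _ _ _ _ 13 (by simp [pvSchoolYears]; try omega)
           (by simp [pvSchoolYears]; try omega)]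
         rw [min_eq_right (by simp [pvSchoolYears]; try omega)]
         try rw [min_eq_right (by simp [pvSchoolYears]; try omega)]
         decide)
  · have hs' : pvSchoolYears.contains start_sy = false := by simpa using hs
    simp only [make_terms_path_py, make_terms_path_py_alt, hs', Bool.false_eq_true, if_false]
    rw [show PySem.List.index? pvSchoolYears "2020-2021" = some 0 from by decide]
    simp only [Option.getD_some]
    generalize hcy : max 1 (min 4 start_year_level) = c
    rw [hcy] at hyb
    obtain ⟨hc1, hc4⟩ := hyb
    rcases include_summer with _ | _ <;> interval_cases c <;>
      (rcases (by omega : n_terms ≤ 0 ∨ (0 < n_terms ∧ n_terms < 13) ∨ 13 ≤ n_terms) with hn | ⟨hn, h13⟩ | h13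
       · rw [PySem.List.pyRange_one_eq_nil (by simp [pvSchoolYears]; try omega)]
         simp [pvLoopA, Int.toNat_of_nonpos hn]
       · interval_cases n_terms <;> decide
       · rw [pvLoopA_congr_n _ _ _ _ _ _ _ _ 13 (by simp [pvSchoolYears]; try omega)
           (by simp [pvSchoolYears]; try omega)]
         rw [min_eq_right (by simp [pvSchoolYears]; try omega)]
         try rw [min_eq_right (by simp [pvSchoolYears]; try omega)]
         decide)

-- ===== VERDICT (by name: the statement is the Claim_ definition above) =====
theorem make_terms_path_py_spec : Claim_equal_make_terms_path_py := by
  intro s y n b _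
  exact pv_main s y n b
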